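-- pv_equiv track=rewrite | github.com/Naheuldark/Codingame | Puzzles/Easy/DisorderedFirstContact.py | define_list_num_char
-- ===== SOURCE A (Python) =====
-- def define_list_num_char(message):
--     sum_j, j = 1, 1
--     list_j = []
--     while sum_j <= len(message):
--         list_j.append(j)
--         j += 1
--         sum_j += j
--     list_j.append(len(message) - sum(list_j))
--     return list_j
-- ===== SOURCE B (Python) =====
-- def define_list_num_char(message):
--     def go(rem, j):
--         if rem < j:
--             return [rem]
--         return [j] + go(rem - j, j + 1)
--     return go(len(message), 1)
-- ===== Notes on version B (the rewrite author's own statement) =====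
-- stated objective: simpler
-- what changed: Replaces A's while-loop (which tracks a running triangular total sum_j, appends into an accumulator list and finally re-sums the whole list to compute the remainder) by a direct recursion on the remaining length: peel off j from the remainder and cons it on, returning the leftover as the last element, with no running sum and no second sum() pass.
import Mathlib
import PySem

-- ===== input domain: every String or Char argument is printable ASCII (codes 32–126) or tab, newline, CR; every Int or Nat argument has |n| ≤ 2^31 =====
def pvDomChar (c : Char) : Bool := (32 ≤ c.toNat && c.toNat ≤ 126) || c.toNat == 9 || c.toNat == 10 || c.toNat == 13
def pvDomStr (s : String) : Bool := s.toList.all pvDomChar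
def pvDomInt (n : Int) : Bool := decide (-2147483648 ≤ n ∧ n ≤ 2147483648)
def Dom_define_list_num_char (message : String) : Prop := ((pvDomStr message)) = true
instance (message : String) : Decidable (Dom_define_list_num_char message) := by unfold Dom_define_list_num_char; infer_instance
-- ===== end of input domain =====

-- B replaces A's running-sum while-loop plus final sum() repass by a single cons-building
-- recursion on the remaining length (objective: simpler).

-- ===== PORT A =====
-- literal port of A's while-loop: state (j, sum_j, list_j); the 1 ≤ j argument only
-- justifies termination (sum_j strictly grows), it changes no computation.
def pvLoopA (L : Int) (j sumj : Int) (acc : List Int) (hj : 1 ≤ j) : List Int :=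
  if _h : sumj ≤ L then
    pvLoopA L (j + 1) (sumj + (j + 1)) (acc ++ [j]) (by omega)
  else
    acc ++ [L - acc.sum]
termination_by (L + 1 - sumj).toNat
decreasing_by omega

def define_list_num_char (message : String) : List Int :=
  pvLoopA (PySem.Str.len message) 1 1 [] (by norm_num)

-- ===== PORT B =====
-- literal port of Source B's inner 'go': recursion on the remaining length.
def pvGoB (rem : Int) (j : Int) (hj : 1 ≤ j) : List Int :=
  if rem < j then [rem]
  else j :: pvGoB (rem - j) (j + 1) (by omega)
termination_by rem.toNat
decreasing_by omega

def define_list_num_char_alt (message : String) : List Int :=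
  pvGoB (PySem.Str.len message) 1 (by norm_num)

-- ===== PRECONDITION & SPEC =====
def Spec_define_list_num_char (message : String) (out : List Int) : Prop := out = define_list_num_char_alt message
instance (message : String) (out : List Int) : Decidable (Spec_define_list_num_char message out) := by unfold Spec_define_list_num_char; infer_instance

-- ===== CLAIM (what is proved, stated in full; the proofs are below) =====
def Claim_equal_define_list_num_char : Prop := ∀ (message : String), Dom_define_list_num_char message → Spec_define_list_num_char message (define_list_num_char message)

-- ===== LEMMAS AND PROOFS =====
-- Loop invariant: at state (j, sumj, acc) with sumj = acc.sum + j, A's loop produces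
-- acc followed by B's recursion on the remaining length L - acc.sum.
theorem pvLoopA_eq_goB (L : Int) (j sumj : Int) (acc : List Int) (hj : 1 ≤ j)
    (hs : sumj = acc.sum + j) :
    pvLoopA L j sumj acc hj = acc ++ pvGoB (L - acc.sum) j hj := by
  revert hs
  induction j, sumj, acc, hj using pvLoopA.induct (L := L) with
  | case1 j sumj acc hj h ih =>
    intro hs
    have hsum : (acc ++ [j]).sum = acc.sum + j := by simp
    rw [pvLoopA, dif_pos h, ih (by omega)]
    conv_rhs => rw [pvGoB, if_neg (by omega)]
    simp
    congr 1
    ring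
  | case2 j sumj acc hj h =>
    intro hs
    rw [pvLoopA, dif_neg h, pvGoB, if_pos (by omega)]


-- ===== VERDICT (by name: the statement is the Claim_ definition above) =====
theorem define_list_num_char_spec : Claim_equal_define_list_num_char := by
  intro message _
  unfold Spec_define_list_num_char define_list_num_char define_list_num_char_alt
  rw [pvLoopA_eq_goB _ _ _ _ _ (by simp)]
  simp
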